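-- pv_equiv track=rewrite | github.com/rbk1983/book-foundry-clean | app.py | _condense_subheads
-- ===== SOURCE A (Python) =====
-- def _condense_subheads(ch_md: str, max_headings: int = 4) -> str:
--     lines = ch_md.split("\n")
--     idxs = [i for i,l in enumerate(lines) if l.strip().startswith("## ") and l.strip().lower() not in ("## conclusion","## final conclusion")]
--     if len(idxs) <= max_headings:
--         return ch_md
--     keep_idxs = set(idxs[:max_headings])
--     out = []
--     for i, l in enumerate(lines):
--         if i in idxs and i not in keep_idxs:
--             continue
--         out.append(l)
--     return "\n".join(out)
-- ===== SOURCE B (Python) =====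
-- def _condense_subheads(ch_md: str, max_headings: int = 4) -> str:
--     out = []
--     seen = 0
--     for l in ch_md.split("\n"):
--         s = l.strip()
--         if s.startswith("## ") and s.lower() not in ("## conclusion", "## final conclusion"):
--             seen += 1
--             if seen > max_headings:
--                 continue
--         out.append(l)
--     return "\n".join(out)
-- ===== Notes on version B (the rewrite author's own statement) =====
-- stated objective: simpler
-- what changed: Replaced A's two-phase build-index-list-then-filter-with-a-keep-set (and per-line membership tests in the index list) by a single pass over the lines with an integer counter of qualifying subheadings, skipping a heading once the counter exceeds max_headings.
-- intended difference: For negative max_headings with more than |max_headings| qualifying subheadings, A's negative slice idxs[:max_headings] accidentally keeps all but the last |max_headings| subheadings, while B drops every subheading beyond the nonpositive cap (all of them), which is the intended meaning of a heading limit. — e.g. on _condense_subheads("## A\n## B", -1): A returns "## A", B returns ""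
import Mathlib
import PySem

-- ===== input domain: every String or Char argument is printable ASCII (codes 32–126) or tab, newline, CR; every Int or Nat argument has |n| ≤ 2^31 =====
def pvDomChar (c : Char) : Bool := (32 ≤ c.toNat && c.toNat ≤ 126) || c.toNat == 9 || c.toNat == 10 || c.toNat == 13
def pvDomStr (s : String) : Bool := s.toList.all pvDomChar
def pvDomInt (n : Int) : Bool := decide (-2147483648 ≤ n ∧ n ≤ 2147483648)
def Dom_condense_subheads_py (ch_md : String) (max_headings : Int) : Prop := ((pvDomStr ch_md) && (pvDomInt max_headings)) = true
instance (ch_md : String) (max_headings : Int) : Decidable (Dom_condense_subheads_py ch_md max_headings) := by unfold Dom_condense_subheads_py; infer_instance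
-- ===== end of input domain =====

-- B replaces A's two-phase "collect heading indices, then filter with a keep-set" by a single
-- counter-driven pass over the lines (objective: simpler).

-- ===== PORT A =====
def condense_subheads_py (ch_md : String) (max_headings : Int) : String :=
  let lines : List String := (PySem.Chars.splitOn ch_md.toList "\n".toList).map String.ofList
  let idxs : List Int := ((PySem.List.enumerate lines).filter
      (fun p => PySem.Str.startswith (PySem.Str.strip p.2) "## " &&
        !(PySem.Str.lower (PySem.Str.strip p.2) == "## conclusion" ||
          PySem.Str.lower (PySem.Str.strip p.2) == "## final conclusion"))).map (·.1)
  if (idxs.length : Int) ≤ max_headings then ch_md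
  else
    let keep_idxs : PySem.Set Int := PySem.Set.ofList (PySem.List.slice idxs none (some max_headings))
    let out : List String := (PySem.List.enumerate lines).foldl
      (fun out p => if idxs.contains p.1 && !(keep_idxs.contains p.1) then out else out ++ [p.2]) []
    PySem.Str.join "\n" out

-- ===== PORT B =====
def condense_subheads_py_alt (ch_md : String) (max_headings : Int) : String :=
  let st := ((PySem.Chars.splitOn ch_md.toList "\n".toList).map String.ofList).foldl
    (fun (st : List String × Int) l =>
      let s := PySem.Str.strip l
      if PySem.Str.startswith s "## " &&
         !(PySem.Str.lower s == "## conclusion" || PySem.Str.lower s == "## final conclusion") then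
        let seen := st.2 + 1
        if seen > max_headings then (st.1, seen) else (st.1 ++ [l], seen)
      else (st.1 ++ [l], st.2))
    ([], 0)
  PySem.Str.join "\n" st.1

-- ===== PRECONDITION & SPEC =====
-- For negative max_headings with more than |max_headings| qualifying subheadings, A's negative slice
-- idxs[:max_headings] accidentally keeps all but the last |max_headings| subheadings, while B drops every
-- subheading beyond the nonpositive cap (all of them), which is the intended meaning of a heading limit.
def D_condense_subheads_py (ch_md : String) (max_headings : Int) : Prop :=
  max_headings < 0 ∧
    ((PySem.Chars.splitOn ch_md.toList "\n".toList).countP (fun cs =>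
      decide ("## ".toList <+: PySem.Chars.strip cs ∧
        PySem.Chars.lower (PySem.Chars.strip cs) ∉
          [("## conclusion".toList), ("## final conclusion".toList)])) : Int) > -max_headings
instance (ch_md : String) (max_headings : Int) : Decidable (D_condense_subheads_py ch_md max_headings) := by
  unfold D_condense_subheads_py; infer_instance

def Spec_condense_subheads_py (ch_md : String) (max_headings : Int) (out : String) : Prop :=
  ¬ D_condense_subheads_py ch_md max_headings → out = condense_subheads_py_alt ch_md max_headings
instance (ch_md : String) (max_headings : Int) (out : String) : Decidable (Spec_condense_subheads_py ch_md max_headings out) := by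
  unfold Spec_condense_subheads_py; infer_instance

def pvDiffWitness_condense_subheads_py : String × Int := ("## A\n## B", -1)
def pvDiffWitnessOut_condense_subheads_py : String × String := ("## A", "")

-- ===== CLAIM (what is proved, stated in full; the proofs are below) =====
def Claim_unchanged_condense_subheads_py : Prop := ∀ (ch_md : String) (max_headings : Int), Dom_condense_subheads_py ch_md max_headings → Spec_condense_subheads_py ch_md max_headings (condense_subheads_py ch_md max_headings)
def Claim_changed_condense_subheads_py : Prop := Dom_condense_subheads_py (pvDiffWitness_condense_subheads_py.1) (pvDiffWitness_condense_subheads_py.2) ∧ D_condense_subheads_py (pvDiffWitness_condense_subheads_py.1) (pvDiffWitness_condense_subheads_py.2) ∧ condense_subheads_py (pvDiffWitness_condense_subheads_py.1) (pvDiffWitness_condense_subheads_py.2) = pvDiffWitnessOut_condense_subheads_py.1 ∧ condense_subheads_py_alt (pvDiffWitness_condense_subheads_py.1) (pvDiffWitness_condense_subheads_py.2) = pvDiffWitnessOut_condense_subheads_py.2 ∧ pvDiffWitnessOut_condense_subheads_py.1 ≠ pvDiffWitnessOut_condense_subheads_py.2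

def Claim_exact_condense_subheads_py : Prop := ∀ (ch_md : String) (max_headings : Int), Dom_condense_subheads_py ch_md max_headings → D_condense_subheads_py ch_md max_headings → condense_subheads_py ch_md max_headings ≠ condense_subheads_py_alt ch_md max_headings

-- ===== LEMMAS AND PROOFS =====

def pvQ (l : String) : Bool :=
  PySem.Str.startswith (PySem.Str.strip l) "## " &&
    !(PySem.Str.lower (PySem.Str.strip l) == "## conclusion" ||
      PySem.Str.lower (PySem.Str.strip l) == "## final conclusion")


def nlSplitAux : List Char → List Char → List (List Char)
  | [], cur => [cur.reverse]
  | c :: rest, cur => if c = '\n' then cur.reverse :: nlSplitAux rest [] else nlSplitAux rest (c :: cur)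

theorem nlSplitAux_ne_nil (l cur : List Char) : nlSplitAux l cur ≠ [] := by
  induction l generalizing cur with
  | nil => simp [nlSplitAux]
  | cons c rest ih => by_cases h : c = '\n' <;> simp [nlSplitAux, h] <;> exact ih _

theorem go_eq_nlSplitAux : ∀ (fuel : Nat) (l cur : List Char) (acc : List (List Char)),
    l.length < fuel →
    PySem.Chars.splitOn.go ['\n'] fuel l cur acc = acc.reverse ++ nlSplitAux l cur := by
  intro fuel
  induction fuel with
  | zero => intro l cur acc h; omega
  | succ f ih =>
    intro l cur acc h
    cases l with
    | nil => simp [PySem.Chars.splitOn.go, nlSplitAux]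
    | cons c rest =>
      by_cases hc : c = '\n'
      · subst hc
        simp [PySem.Chars.splitOn.go, List.isPrefixOf, nlSplitAux]
        rw [ih rest [] (cur.reverse :: acc) (by simp at h ⊢; omega)]
        simp [nlSplitAux]
      · simp [PySem.Chars.splitOn.go, List.isPrefixOf, hc, nlSplitAux]
        rw [if_neg (Ne.symm hc), ih rest (c :: cur) acc (by simp at h ⊢; omega)]

theorem join_cons (sep p : List Char) (ps : List (List Char)) (h : ps ≠ []) :
    PySem.Chars.join sep (p :: ps) = p ++ sep ++ PySem.Chars.join sep ps := by
  cases ps with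
  | nil => exact absurd rfl h
  | cons q rest => exact PySem.Chars.join_cons_cons sep p q rest

theorem join_nlSplitAux : ∀ (l cur : List Char),
    PySem.Chars.join ['\n'] (nlSplitAux l cur) = cur.reverse ++ l := by
  intro l
  induction l with
  | nil => intro cur; simp [nlSplitAux, PySem.Chars.join_singleton]
  | cons c rest ih =>
    intro cur
    by_cases hc : c = '\n'
    · subst hc
      rw [nlSplitAux, if_pos rfl, join_cons _ _ _ (nlSplitAux_ne_nil rest []), ih []]
      simp
    · rw [nlSplitAux, if_neg hc, ih (c :: cur)]
      simp

theorem join_split (s : String) :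
    PySem.Str.join "\n" ((PySem.Chars.splitOn s.toList "\n".toList).map String.ofList) = s := by
  have h : "\n".toList = ['\n'] := rfl
  rw [h, PySem.Str.join]
  have hmap : ((PySem.Chars.splitOn s.toList ['\n']).map String.ofList).map String.toList
      = PySem.Chars.splitOn s.toList ['\n'] := by
    rw [List.map_map]; simp [Function.comp_def]
  rw [hmap]
  rw [PySem.Chars.splitOn, go_eq_nlSplitAux (s.toList.length + 1) s.toList [] [] (by omega)]
  simp [join_nlSplitAux]


def pvLineB (cs : List Char) : Bool :=
  decide ("## ".toList <+: PySem.Chars.strip cs ∧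
    PySem.Chars.lower (PySem.Chars.strip cs) ∉
      [("## conclusion".toList), ("## final conclusion".toList)])

theorem pvQ_ofList (cs : List Char) : pvQ (String.ofList cs) = pvLineB cs := by
  unfold pvQ pvLineB
  have hstrip : (PySem.Str.strip (String.ofList cs)).toList = PySem.Chars.strip cs := by
    rw [PySem.Str.toList_strip, String.toList_ofList]
  have hlow : (PySem.Str.lower (PySem.Str.strip (String.ofList cs))).toList
      = PySem.Chars.lower (PySem.Chars.strip cs) := by
    rw [PySem.Str.toList_lower, hstrip]
  apply Bool.eq_iff_iff.mpr
  simp only [Bool.and_eq_true, Bool.not_eq_true', Bool.or_eq_false_iff, beq_eq_false_iff_ne,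
    ne_eq, decide_eq_true_eq, List.mem_cons, not_or,
    PySem.Str.startswith_eq, PySem.Chars.startswith_iff, hstrip, ← String.toList_inj, hlow]
  simp [List.not_mem_nil]

theorem pvCount_eq (ch_md : String) :
    (PySem.Chars.splitOn ch_md.toList "\n".toList).countP pvLineB
      = (((PySem.Chars.splitOn ch_md.toList "\n".toList).map String.ofList).filter pvQ).length := by
  generalize PySem.Chars.splitOn ch_md.toList "\n".toList = l
  induction l with
  | nil => rfl
  | cons c t ih =>
    rw [List.map_cons, List.filter_cons, List.countP_cons, pvQ_ofList c]
    by_cases h : pvLineB c <;> simp [h, ih]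

def keepN : List String → Nat → List String
  | [], _ => []
  | l :: ls, k =>
    if pvQ l then
      match k with
      | 0 => keepN ls 0
      | (k'+1) => l :: keepN ls k'
    else l :: keepN ls k

def qIdxs : List String → Int → List Int
  | [], _ => []
  | l :: ls, s => if pvQ l then s :: qIdxs ls (s+1) else qIdxs ls (s+1)

theorem qIdxs_eq : ∀ (lines : List String) (s : Int),
    ((PySem.List.enumerate lines s).filter (fun p => pvQ p.2)).map (·.1) = qIdxs lines s := by
  intro lines
  induction lines with
  | nil => intro s; simp [PySem.List.enumerate_nil, qIdxs]
  | cons l ls ih =>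
    intro s
    rw [PySem.List.enumerate_cons, qIdxs]
    by_cases h : pvQ l <;> simp [h, List.filter_cons, ih (s+1)]

theorem qIdxs_lb : ∀ (lines : List String) (s j : Int), j ∈ qIdxs lines s → s ≤ j := by
  intro lines
  induction lines with
  | nil => intro s j h; simp [qIdxs] at h
  | cons l ls ih =>
    intro s j h
    rw [qIdxs] at h
    by_cases hq : pvQ l
    · rw [if_pos hq] at h
      rcases List.mem_cons.mp h with h1 | h2
      · omega
      · have := ih (s+1) j h2; omega
    · rw [if_neg hq] at h
      have := ih (s+1) j h; omega

theorem qIdxs_length : ∀ (lines : List String) (s : Int),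
    (qIdxs lines s).length = (lines.filter pvQ).length := by
  intro lines
  induction lines with
  | nil => intro s; simp [qIdxs]
  | cons l ls ih =>
    intro s
    by_cases h : pvQ l <;> simp [qIdxs, h, List.filter_cons, ih (s+1)]

theorem keepN_all : ∀ (lines : List String) (k : Nat),
    (lines.filter pvQ).length ≤ k → keepN lines k = lines := by
  intro lines
  induction lines with
  | nil => intro k _; rfl
  | cons l ls ih =>
    intro k hk
    by_cases h : pvQ l
    · simp [List.filter_cons, h] at hk
      cases k with
      | zero => omega
      | succ k' => simp [keepN, h]; exact ih k' (by omega)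
    · simp [List.filter_cons, h] at hk
      simp [keepN, h]; exact ih k hk

theorem foldA : ∀ (lines : List String) (s : Int) (gidxs gkeep : List Int) (k : Nat) (acc : List String),
    (∀ j, s ≤ j → (j ∈ gidxs ↔ j ∈ qIdxs lines s)) →
    (∀ j, s ≤ j → (j ∈ gkeep ↔ j ∈ (qIdxs lines s).take k)) →
    (PySem.List.enumerate lines s).foldl
      (fun out p => if gidxs.contains p.1 && !(gkeep.contains p.1) then out else out ++ [p.2]) acc
    = acc ++ keepN lines k := by
  intro lines
  induction lines with
  | nil => intro s gidxs gkeep k acc _ _; simp [PySem.List.enumerate_nil, keepN]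
  | cons l ls ih =>
    intro s gidxs gkeep k acc hi hk
    rw [PySem.List.enumerate_cons, List.foldl_cons]
    by_cases hq : pvQ l
    · have hqe : qIdxs (l :: ls) s = s :: qIdxs ls (s+1) := by rw [qIdxs, if_pos hq]
      have hsi : s ∈ gidxs := (hi s le_rfl).mpr (by rw [hqe]; exact List.mem_cons_self ..)
      have hnotrest : s ∉ qIdxs ls (s+1) := fun h => by have := qIdxs_lb ls (s+1) s h; omega
      cases k with
      | zero =>
        have hsk : s ∉ gkeep := fun h => by
          have := (hk s le_rfl).mp h; rw [hqe] at this; simp at this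
        have : (gidxs.contains s && !(gkeep.contains s)) = true := by
          simp [List.contains_iff_mem, hsi, hsk]
        rw [this, if_pos rfl]
        rw [ih (s+1) gidxs gkeep 0 acc
          (fun j hj => by rw [hi j (by omega), hqe]; simp; intro h; omega)
          (fun j hj => by rw [hk j (by omega), hqe]; simp)]
        simp [keepN, hq]
      | succ k' =>
        have hsk : s ∈ gkeep := (hk s le_rfl).mpr (by rw [hqe]; simp)
        have : (gidxs.contains s && !(gkeep.contains s)) = false := by
          simp [List.contains_iff_mem, hsk]
        rw [this, if_neg (by simp)]
        rw [ih (s+1) gidxs gkeep k' (acc ++ [l])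
          (fun j hj => by rw [hi j (by omega), hqe]; simp; intro h; omega)
          (fun j hj => by rw [hk j (by omega), hqe]; simp [List.take_succ_cons]; intro h; omega)]
        simp [keepN, hq]
    · have hqe : qIdxs (l :: ls) s = qIdxs ls (s+1) := by rw [qIdxs, if_neg hq]
      have hsi : s ∉ gidxs := fun h => by
        have := (hi s le_rfl).mp h; rw [hqe] at this
        have := qIdxs_lb ls (s+1) s this; omega
      have : (gidxs.contains s && !(gkeep.contains s)) = false := by
        simp [List.contains_iff_mem, hsi]
      rw [this, if_neg (by simp)]
      rw [ih (s+1) gidxs gkeep k (acc ++ [l])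
        (fun j hj => by rw [hi j (by omega), hqe])
        (fun j hj => by rw [hk j (by omega), hqe])]
      simp [keepN, hq]

theorem foldB (m : Int) : ∀ (lines : List String) (c : Int) (acc : List String),
    lines.foldl
      (fun (st : List String × Int) l =>
        let s := PySem.Str.strip l
        if PySem.Str.startswith s "## " &&
           !(PySem.Str.lower s == "## conclusion" || PySem.Str.lower s == "## final conclusion") then
          let seen := st.2 + 1
          if seen > m then (st.1, seen) else (st.1 ++ [l], seen)
        else (st.1 ++ [l], st.2))
      (acc, c)
    = (acc ++ keepN lines (m - c).toNat, c + ((lines.filter pvQ).length : Int)) := by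
  intro lines
  induction lines with
  | nil => intro c acc; simp [keepN]
  | cons l ls ih =>
    intro c acc
    rw [List.foldl_cons]
    have hpv : (PySem.Str.startswith (PySem.Str.strip l) "## " &&
        !(PySem.Str.lower (PySem.Str.strip l) == "## conclusion" ||
          PySem.Str.lower (PySem.Str.strip l) == "## final conclusion")) = pvQ l := rfl
    by_cases hq : pvQ l
    · simp only [hpv, hq, if_pos, List.filter_cons]
      by_cases hgt : c + 1 > m
      · rw [if_pos hgt, ih (c+1)]
        have h0 : (m - c).toNat = 0 := by omega
        have h1 : (m - (c+1)).toNat = 0 := by omega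
        simp [keepN, hq, h0, h1, List.filter_cons]
        omega
      · rw [if_neg hgt, ih (c+1)]
        have h1 : (m - c).toNat = (m - (c+1)).toNat + 1 := by omega
        simp [keepN, hq, h1, List.filter_cons]
        omega
    · simp only [hpv, hq]
      rw [if_neg (by simp [hq]), ih c]
      simp [keepN, hq, List.filter_cons]

theorem alt_eq (ch_md : String) (m : Int) :
    condense_subheads_py_alt ch_md m
      = PySem.Str.join "\n"
          (keepN ((PySem.Chars.splitOn ch_md.toList "\n".toList).map String.ofList) m.toNat) := by
  rw [condense_subheads_py_alt]
  rw [foldB m _ 0 []]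
  simp

theorem mainthm (ch_md : String) (m : Int)
    (hnD : ¬ D_condense_subheads_py ch_md m) :
    condense_subheads_py ch_md m = condense_subheads_py_alt ch_md m := by
  rw [alt_eq]
  simp only [condense_subheads_py]
  have hfun : (fun p : Int × String => PySem.Str.startswith (PySem.Str.strip p.2) "## " &&
        !(PySem.Str.lower (PySem.Str.strip p.2) == "## conclusion" ||
          PySem.Str.lower (PySem.Str.strip p.2) == "## final conclusion"))
      = (fun p : Int × String => pvQ p.2) := rfl
  rw [hfun, qIdxs_eq]
  set lines : List String := (PySem.Chars.splitOn ch_md.toList "\n".toList).map String.ofList with hlines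
  have hnD' : ¬ (m < 0 ∧
      ((PySem.Chars.splitOn ch_md.toList "\n".toList).countP pvLineB : Int) > -m) := hnD
  have hcount : (PySem.Chars.splitOn ch_md.toList "\n".toList).countP pvLineB
      = (lines.filter pvQ).length := by
    rw [pvCount_eq, hlines]
  by_cases hle : ((qIdxs lines 0).length : Int) ≤ m
  · rw [if_pos hle]
    rw [qIdxs_length] at hle
    rw [keepN_all lines m.toNat (by omega), hlines, join_split]
  · rw [if_neg hle]
    have hset : ∀ (xs : List Int) (x : Int),
        PySem.Set.contains (PySem.Set.ofList xs) x = List.contains (PySem.Set.ofList xs) x :=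
      fun _ _ => rfl
    simp only [hset]
    rw [qIdxs_length] at hle
    by_cases hm : 0 ≤ m
    · have hslice : PySem.List.slice (qIdxs lines 0) none (some m) = (qIdxs lines 0).take m.toNat :=
        PySem.List.slice_to _ hm
      rw [foldA lines 0 (qIdxs lines 0)
            (PySem.Set.ofList (PySem.List.slice (qIdxs lines 0) none (some m))) m.toNat []
            (fun j _ => Iff.rfl)
            (fun j _ => by rw [PySem.Set.mem_ofList, hslice])]
      simp
    · have hc : ((lines.filter pvQ).length : Int) ≤ -m := by
        rw [← hcount]; omega
      have hk : 0 < (-m).toNat := by omega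
      have hslice : PySem.List.slice (qIdxs lines 0) none (some m) = [] := by
        rw [show m = -(((-m).toNat : Nat) : Int) by omega,
            PySem.List.slice_to_neg_natCast _ _ hk]
        rw [qIdxs_length]
        have : (lines.filter pvQ).length - (-m).toNat = 0 := by omega
        rw [this, List.take_zero]
      rw [foldA lines 0 (qIdxs lines 0)
            (PySem.Set.ofList (PySem.List.slice (qIdxs lines 0) none (some m))) 0 []
            (fun j _ => Iff.rfl)
            (fun j _ => by rw [PySem.Set.mem_ofList, hslice]; simp)]
      rw [show m.toNat = 0 by omega]
      simp


def sumLen (xs : List String) : Nat := (xs.map (fun l => l.toList.length)).sum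

theorem keepN_le : ∀ (lines : List String) (k : Nat),
    (keepN lines 0).length ≤ (keepN lines k).length ∧
      sumLen (keepN lines 0) ≤ sumLen (keepN lines k) := by
  intro lines
  induction lines with
  | nil => intro k; simp [keepN]
  | cons l ls ih =>
    intro k
    by_cases hq : pvQ l
    · cases k with
      | zero => exact ⟨le_rfl, le_rfl⟩
      | succ k' =>
        have h0 : keepN (l :: ls) 0 = keepN ls 0 := by simp [keepN, hq]
        have hstep : keepN (l :: ls) (k' + 1) = l :: keepN ls k' := by simp [keepN, hq]
        rw [h0, hstep]
        refine ⟨?_, ?_⟩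
        · simp only [List.length_cons]
          have := (ih k').1; omega
        · simp only [sumLen, List.map_cons, List.sum_cons]
          have := (ih k').2; simp only [sumLen] at this; omega
    · have h0 : ∀ j, keepN (l :: ls) j = l :: keepN ls j := fun j => by
        cases j <;> simp [keepN, hq]
      rw [h0 0, h0 k]
      refine ⟨?_, ?_⟩
      · simp only [List.length_cons]
        have := (ih k).1; omega
      · simp only [sumLen, List.map_cons, List.sum_cons]
        have := (ih k).2; simp only [sumLen] at this; omega

theorem keepN_lt : ∀ (lines : List String) (k : Nat), 1 ≤ k →
    1 ≤ (lines.filter pvQ).length →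
    (keepN lines 0).length < (keepN lines k).length := by
  intro lines
  induction lines with
  | nil => intro k _ h; simp at h
  | cons l ls ih =>
    intro k hk hc
    by_cases hq : pvQ l
    · cases k with
      | zero => omega
      | succ k' =>
        have := (keepN_le ls k').1
        simp [keepN, hq]
        omega
    · simp only [List.filter_cons, hq, Bool.false_eq_true, if_neg] at hc
      have := ih k hk (by simpa using hc)
      simp [keepN, hq]
      omega

theorem keepN_mem_qual : ∀ (lines : List String) (k : Nat), 1 ≤ k →
    1 ≤ (lines.filter pvQ).length →
    ∃ l, l ∈ keepN lines k ∧ pvQ l = true := by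
  intro lines
  induction lines with
  | nil => intro k _ h; simp at h
  | cons l ls ih =>
    intro k hk hc
    by_cases hq : pvQ l
    · cases k with
      | zero => omega
      | succ k' => exact ⟨l, by simp [keepN, hq], hq⟩
    · simp only [List.filter_cons, hq, Bool.false_eq_true, if_neg] at hc
      obtain ⟨x, hx, hxq⟩ := ih k hk (by simpa using hc)
      exact ⟨x, by simp [keepN, hq, hx], hxq⟩

theorem sumLen_pos (a : List String) (l : String) (hl : l ∈ a) (hne : l.toList ≠ []) :
    1 ≤ sumLen a := by
  induction a with
  | nil => simp at hl
  | cons x xs ih =>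
    rcases List.mem_cons.mp hl with h | h
    · subst h
      have : 1 ≤ l.toList.length := by
        cases h : l.toList with
        | nil => exact absurd h hne
        | cons c cs => simp
      simp only [sumLen, List.map_cons, List.sum_cons]
      omega
    · have := ih h
      simp only [sumLen, List.map_cons, List.sum_cons]
      simp only [sumLen] at this
      omega

theorem JL_formula : ∀ (x : String) (xs : List String),
    (PySem.Chars.join ['\n'] ((x :: xs).map String.toList)).length + 1
      = sumLen (x :: xs) + (x :: xs).length := by
  intro x xs
  induction xs generalizing x with
  | nil => simp [PySem.Chars.join_singleton, sumLen]
  | cons y ys ih =>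
    simp only [List.map_cons]
    rw [PySem.Chars.join_cons_cons]
    have := ih y
    simp only [List.map_cons] at this
    simp only [sumLen, List.map_cons, List.sum_cons, List.length_cons] at this ⊢
    simp only [List.length_append, List.length_cons, List.length_nil]
    omega

theorem pvQ_ne_nil (l : String) (hq : pvQ l = true) : l.toList ≠ [] := by
  intro hnil
  unfold pvQ at hq
  rw [Bool.and_eq_true, PySem.Str.startswith_eq, PySem.Str.toList_strip, hnil] at hq
  have : PySem.Chars.strip ([] : List Char) = [] := rfl
  rw [this] at hq
  have := (PySem.Chars.startswith_iff _ _).mp hq.1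
  simp at this

theorem join_len_lt (a b : List String)
    (hn : b.length < a.length) (hs : sumLen b ≤ sumLen a)
    (hq : ∃ l, l ∈ a ∧ pvQ l = true) :
    (PySem.Chars.join ['\n'] (b.map String.toList)).length
      < (PySem.Chars.join ['\n'] (a.map String.toList)).length := by
  obtain ⟨l, hla, hlq⟩ := hq
  cases a with
  | nil => simp at hla
  | cons x xs =>
    have hA := JL_formula x xs
    have hApos : 1 ≤ sumLen (x :: xs) := sumLen_pos _ l hla (pvQ_ne_nil l hlq)
    cases b with
    | nil =>
      have hb : (PySem.Chars.join ['\n'] (([] : List String).map String.toList)).length = 0 := rfl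
      rw [hb]
      have hlen : 1 ≤ (x :: xs).length := by simp
      omega
    | cons y ys =>
      have hB := JL_formula y ys
      simp only [sumLen, List.map_cons, List.sum_cons, List.length_cons] at hA hB hApos hs hn ⊢
      omega

theorem tightthm (ch_md : String) (m : Int)
    (hD : D_condense_subheads_py ch_md m) :
    condense_subheads_py ch_md m ≠ condense_subheads_py_alt ch_md m := by
  obtain ⟨hm, hcnt⟩ := hD
  rw [alt_eq]
  simp only [condense_subheads_py]
  have hfun : (fun p : Int × String => PySem.Str.startswith (PySem.Str.strip p.2) "## " &&
        !(PySem.Str.lower (PySem.Str.strip p.2) == "## conclusion" ||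
          PySem.Str.lower (PySem.Str.strip p.2) == "## final conclusion"))
      = (fun p : Int × String => pvQ p.2) := rfl
  rw [hfun, qIdxs_eq]
  set lines : List String := (PySem.Chars.splitOn ch_md.toList "\n".toList).map String.ofList with hlines
  have hcount : (PySem.Chars.splitOn ch_md.toList "\n".toList).countP pvLineB
      = (lines.filter pvQ).length := by
    rw [pvCount_eq, hlines]
  have hcnt2 : ((PySem.Chars.splitOn ch_md.toList "\n".toList).countP pvLineB : Int) > -m := hcnt
  rw [hcount] at hcnt2
  have hk : 0 < (-m).toNat := by omega
  have hcgt : (-m).toNat < (lines.filter pvQ).length := by omega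
  have hle : ¬ ((qIdxs lines 0).length : Int) ≤ m := by
    rw [qIdxs_length]; omega
  rw [if_neg hle]
  have hset : ∀ (xs : List Int) (x : Int),
      PySem.Set.contains (PySem.Set.ofList xs) x = List.contains (PySem.Set.ofList xs) x :=
    fun _ _ => rfl
  simp only [hset]
  have hslice : PySem.List.slice (qIdxs lines 0) none (some m)
      = (qIdxs lines 0).take ((qIdxs lines 0).length - (-m).toNat) := by
    conv_lhs => rw [show m = -(((-m).toNat : Nat) : Int) from by omega]
    exact PySem.List.slice_to_neg_natCast _ _ hk
  rw [foldA lines 0 (qIdxs lines 0)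
        (PySem.Set.ofList (PySem.List.slice (qIdxs lines 0) none (some m)))
        ((qIdxs lines 0).length - (-m).toNat) []
        (fun j _ => Iff.rfl)
        (fun j _ => by rw [PySem.Set.mem_ofList, hslice])]
  rw [show m.toNat = 0 by omega]
  simp only [List.nil_append]
  set K : Nat := (qIdxs lines 0).length - (-m).toNat with hK
  have hK1 : 1 ≤ K := by rw [hK, qIdxs_length]; omega
  have hc1 : 1 ≤ (lines.filter pvQ).length := by omega
  intro heq
  have htl := congrArg String.toList heq
  rw [PySem.Str.toList_join, PySem.Str.toList_join] at htl
  have hlen := congrArg List.length htl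
  have hlt := join_len_lt (keepN lines K) (keepN lines 0)
    (keepN_lt lines K hK1 hc1) (keepN_le lines K).2
    (keepN_mem_qual lines K hK1 hc1)
  rw [show ("\n".toList) = ['\n'] from rfl] at hlen
  omega

-- ===== VERDICT (by name: the statement is the Claim_ definition above) =====
theorem condense_subheads_py_spec : Claim_unchanged_condense_subheads_py := by
  intro ch_md max_headings _hDom hnD
  exact mainthm ch_md max_headings hnD

theorem condense_subheads_py_changed : Claim_changed_condense_subheads_py := by
  unfold Claim_changed_condense_subheads_py; decide

theorem condense_subheads_py_tight : Claim_exact_condense_subheads_py := by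
  intro ch_md max_headings _hDom hD
  exact tightthm ch_md max_headings hD
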